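-- pv_equiv track=rewrite | github.com/NightSkumbry/shvetsov | kompege/19/6964.py | f21l
-- ===== SOURCE A (Python) =====
-- def f21l(s, t=0):
--     if s >= 100:
--         if t in [2]:
--             return True
--         return False
--     if t >= 3:
--         return False
--
--     a = [f21l(s+2, t+1), f21l(s+4, t+1), f21l(s*2, t+1)]
--
--     if t%2 == 0:
--         return any(a)
--     return all(a)
-- ===== SOURCE B (Python) =====
-- def f21l(s, t=0):
--     # Iterative postorder evaluation of the same game tree with an explicit work stack.
--     vals = []                      # value stack
--     work = [("visit", s, t)]       # work stack
--     while work: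
--         tag, x, d = work.pop()
--         if tag == "visit":
--             if x >= 100:
--                 vals.append(d == 2)
--             elif d >= 3:
--                 vals.append(False)
--             else:
--                 work.append(("combine", x, d))
--                 for c in (x + 2, x + 4, x * 2):
--                     work.append(("visit", c, d + 1))
--         else:
--             v1 = vals.pop()        # value of (x+2, d+1)
--             v2 = vals.pop()        # value of (x+4, d+1)
--             v3 = vals.pop()        # value of (x*2, d+1)
--             a = [v1, v2, v3]
--             vals.append(any(a) if d % 2 == 0 else all(a))
--     return vals[-1]
-- ===== Notes on version B (the rewrite author's own statement) =====
-- stated objective: alternative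
-- what changed: Replaces A's triple-branching recursion by an iterative postorder evaluation with an explicit work stack of visit/combine frames and a value stack, combining child values with any/all by depth parity; Pre_ excludes only s <= 0 with t < -990, where the s*2 chain keeps s nonpositive so A's recursion depth 3-t reaches CPython's recursion limit and A raises RecursionError without ever returning a value.
import Mathlib
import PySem

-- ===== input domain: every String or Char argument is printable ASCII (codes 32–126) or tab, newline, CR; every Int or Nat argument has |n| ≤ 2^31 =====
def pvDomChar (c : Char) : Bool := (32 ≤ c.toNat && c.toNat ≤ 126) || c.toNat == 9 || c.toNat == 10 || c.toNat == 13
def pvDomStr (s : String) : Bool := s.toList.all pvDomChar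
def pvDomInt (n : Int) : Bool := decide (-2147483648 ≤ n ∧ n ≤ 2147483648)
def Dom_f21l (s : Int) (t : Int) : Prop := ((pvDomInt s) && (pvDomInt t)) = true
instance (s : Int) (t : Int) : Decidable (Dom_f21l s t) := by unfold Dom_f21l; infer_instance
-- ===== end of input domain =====

-- B replaces A's triple-branching recursion by an iterative postorder evaluation with an
-- explicit work stack (visit/combine frames) and a value stack; same tree semantics, same cost.


-- ===== PORT A =====
-- literal transliteration of the recursive Python f21l; the Nat fuel only makes the
-- recursion structural: a call with fuel (3 - t).toNat never reaches the fuel-0 branch,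
-- because t < 3 there forces fuel ≥ 1
def f21lGo : Nat → Int → Int → Bool
  | n, s, t =>
    if 100 ≤ s then
      if t = 2 then true else false          -- `if t in [2]: return True` / `return False`
    else if 3 ≤ t then false
    else
      match n with
      | 0 => false                           -- unreachable under fuel (3 - t).toNat
      | n + 1 =>
        let a := [f21lGo n (s + 2) (t + 1), f21lGo n (s + 4) (t + 1), f21lGo n (s * 2) (t + 1)]
        if PySem.Int.mod t 2 = 0 then a.any id else a.all id

def f21l (s : Int) (t : Int) : Bool := f21lGo (3 - t).toNat s t

-- ===== PORT B =====
-- the tagged tuples ("visit", x, d) / ("combine", x, d) of Source B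
inductive pvFrame where
  | visit (x d : Int)
  | combine (x d : Int)
deriving DecidableEq, Repr

-- the while-loop of Source B; both stacks are kept top-first (Python appends/pops at the right);
-- the Nat fuel only makes the loop structural: the fuel passed by f21l_alt exceeds the
-- number of iterations, so the fuel-0 branch is never reached
def f21lLoop : Nat → List pvFrame → List Bool → List Bool
  | 0, _, vals => vals
  | _ + 1, [], vals => vals
  | fuel + 1, .visit x d :: rest, vals =>
      if 100 ≤ x then f21lLoop fuel rest (decide (d = 2) :: vals)
      else if 3 ≤ d then f21lLoop fuel rest (false :: vals)
      else
        -- push combine, then the children (x+2, x+4, x*2); top of stack = last pushed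
        f21lLoop fuel (.visit (x * 2) (d + 1) :: .visit (x + 4) (d + 1) :: .visit (x + 2) (d + 1)
                        :: .combine x d :: rest) vals
  | fuel + 1, .combine _ d :: rest, vals =>
      match vals with
      | v1 :: v2 :: v3 :: vrest =>
          let a := [v1, v2, v3]
          f21lLoop fuel rest ((if PySem.Int.mod d 2 = 0 then a.any id else a.all id) :: vrest)
      | _ => vals                            -- unreachable: the three child values are on the stack

def f21l_alt (s : Int) (t : Int) : Bool :=
  (f21lLoop (2 * 3 ^ (3 - t).toNat) [.visit s t] []).headD false   -- vals[-1]

-- ===== PRECONDITION & SPEC =====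
-- Pre_ excludes only s ≤ 0 with t < -990: there the s*2 child stays nonpositive, so A's
-- recursion depth 3-t reaches CPython's recursion limit and the Python A raises
-- RecursionError — it returns a value on NO excluded input (each recursion level first
-- performs ~3.6e11 calls on the positive children, so the raise is its only outcome).
def Pre_f21l (s : Int) (t : Int) : Prop := 1 ≤ s ∨ -990 ≤ t
instance (s : Int) (t : Int) : Decidable (Pre_f21l s t) := by unfold Pre_f21l; infer_instance
def pvWitness_f21l : Int × Int := (0, 0)

def Spec_f21l (s : Int) (t : Int) (out : Bool) : Prop := out = f21l_alt s t
instance (s : Int) (t : Int) (out : Bool) : Decidable (Spec_f21l s t out) := by unfold Spec_f21l; infer_instance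

-- ===== CLAIM (what is proved, stated in full; the proofs are below) =====
def Claim_equal_f21l : Prop := ∀ (s : Int) (t : Int), Dom_f21l s t → Pre_f21l s t → Spec_f21l s t (f21l s t)

-- ===== LEMMAS AND PROOFS =====

-- proof device: the number of loop iterations f21lLoop spends on the subtree of (x, d),
-- indexed by the same fuel as f21lGo (a visit frame plus, for inner nodes, a combine frame)
def f21lCost : Nat → Int → Int → Nat
  | n, x, d =>
    if 100 ≤ x then 1
    else if 3 ≤ d then 1
    else
      match n with
      | 0 => 1
      | n + 1 => 2 + f21lCost n (x + 2) (d + 1) + f21lCost n (x + 4) (d + 1) + f21lCost n (x * 2) (d + 1)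

lemma f21lCost_le (n : Nat) : ∀ (x d : Int), f21lCost n x d ≤ 2 * 3 ^ n - 1 := by
  induction n with
  | zero =>
      intro x d
      rw [f21lCost]
      split_ifs <;> simp
  | succ n ih =>
      intro x d
      have h3 : 1 ≤ 3 ^ n := Nat.one_le_pow _ _ (by omega)
      have hp : 3 ^ (n + 1) = 3 * 3 ^ n := pow_succ' 3 n
      rw [f21lCost]
      split_ifs with h1 h2
      · omega
      · omega
      · have a1 := ih (x + 2) (d + 1)
        have a2 := ih (x + 4) (d + 1)
        have a3 := ih (x * 2) (d + 1)
        omega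

-- loop on an empty work stack returns the value stack, whatever the fuel
lemma f21lLoop_nil (f : Nat) (vals : List Bool) : f21lLoop f [] vals = vals := by
  cases f <;> rw [f21lLoop]

-- processing a visit frame consumes exactly its cost in fuel and pushes the recursive value
lemma f21lLoop_visit (n : Nat) : ∀ (x d : Int), (3 - d).toNat = n →
    ∀ (rest : List pvFrame) (vals : List Bool) (f : Nat), f21lCost n x d ≤ f →
    f21lLoop f (pvFrame.visit x d :: rest) vals
      = f21lLoop (f - f21lCost n x d) rest (f21l x d :: vals) := by
  induction n with
  | zero =>
      intro x d hn rest vals f hf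
      have hd : 3 ≤ d := by omega
      have hc : f21lCost 0 x d = 1 := by rw [f21lCost]; split_ifs <;> rfl
      rw [hc] at hf ⊢
      obtain ⟨f', rfl⟩ : ∃ f', f = f' + 1 := ⟨f - 1, by omega⟩
      rw [f21lLoop]
      unfold f21l f21lGo
      rw [hn]
      by_cases hx : 100 ≤ x
      · by_cases h2 : d = 2 <;> simp [hx, h2]
      · simp [hx, hd]
  | succ n ih =>
      intro x d hn rest vals f hf
      have hd : ¬ 3 ≤ d := by omega
      have hd1 : (3 - (d + 1)).toNat = n := by omega
      by_cases hx : 100 ≤ x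
      · have hc : f21lCost (n + 1) x d = 1 := by rw [f21lCost]; simp [hx]
        rw [hc] at hf ⊢
        obtain ⟨f', rfl⟩ : ∃ f', f = f' + 1 := ⟨f - 1, by omega⟩
        rw [f21lLoop]
        unfold f21l f21lGo
        rw [hn]
        by_cases h2 : d = 2 <;> simp [hx, h2]
      · -- inner node: the loop pushes combine and the three children
        have hc : f21lCost (n + 1) x d
            = 2 + f21lCost n (x + 2) (d + 1) + f21lCost n (x + 4) (d + 1)
                + f21lCost n (x * 2) (d + 1) := by
          rw [f21lCost]; simp [hx, hd]
        set c1 := f21lCost n (x + 2) (d + 1) with hc1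
        set c2 := f21lCost n (x + 4) (d + 1) with hc2
        set c3 := f21lCost n (x * 2) (d + 1) with hc3
        rw [hc] at hf ⊢
        obtain ⟨f', rfl⟩ : ∃ f', f = f' + 1 := ⟨f - 1, by omega⟩
        rw [f21lLoop]
        simp only [hx, hd, if_false]
        rw [ih (x * 2) (d + 1) hd1 _ _ f' (by omega),
            ih (x + 4) (d + 1) hd1 _ _ (f' - c3) (by omega),
            ih (x + 2) (d + 1) hd1 _ _ (f' - c3 - c2) (by omega)]
        obtain ⟨g, hg⟩ : ∃ g, f' - c3 - c2 - c1 = g + 1 := ⟨f' - c3 - c2 - c1 - 1, by omega⟩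
        rw [hg, f21lLoop]
        have hfuel : g = f' + 1 - (2 + c1 + c2 + c3) := by omega
        have hval : (if PySem.Int.mod d 2 = 0
              then [f21l (x + 2) (d + 1), f21l (x + 4) (d + 1), f21l (x * 2) (d + 1)].any id
              else [f21l (x + 2) (d + 1), f21l (x + 4) (d + 1), f21l (x * 2) (d + 1)].all id)
            = f21l x d := by
          conv_rhs => unfold f21l f21lGo
          rw [hn]
          simp only [hx, hd, if_false]
          unfold f21l
          rw [hd1]
        rw [hfuel] at hg ⊢
        simp only [hval]

-- ===== VERDICT (by name: the statement is the Claim_ definition above) =====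
theorem f21l_spec : Claim_equal_f21l := by
  intro s t _hdom _hpre
  unfold Spec_f21l f21l_alt
  have hb := f21lCost_le ((3 - t).toNat) s t
  have h1 : 1 ≤ 3 ^ (3 - t).toNat := Nat.one_le_pow _ _ (by omega)
  rw [f21lLoop_visit ((3 - t).toNat) s t rfl [] [] (2 * 3 ^ (3 - t).toNat) (by omega)]
  rw [f21lLoop_nil]
  rfl
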